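-- pv_equiv track=rewrite | github.com/denisschmidt/leetcode | leetcode/tree/1649. Create Sorted Array through Instructions/py/main.py | createSortedArray
-- ===== SOURCE A (Python) =====
-- import bisect
--
-- def createSortedArray(instructions):
--   MOD = 10**9+7
--   current = []
--   res = 0
--
--   for i in range(len(instructions)):
--     left_cost = bisect.bisect_left(current, instructions[i])
--     right_cost = i - bisect.bisect_right(current, instructions[i])
--
--     res += min(left_cost, right_cost)
--     res %= MOD
--     bisect.insort(current, instructions[i])
--
--   return res
-- ===== SOURCE B (Python) =====
-- def createSortedArray(instructions):
--     total = 0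
--     for i, x in enumerate(instructions):
--         lt = gt = 0
--         for y in instructions[:i]:
--             if y < x:
--                 lt += 1
--             elif y > x:
--                 gt += 1
--         total += lt if lt < gt else gt
--     return total % (10**9 + 7)
-- ===== Notes on version B (the rewrite author's own statement) =====
-- stated objective: simpler
-- what changed: B drops the maintained sorted array with binary search and insertion (bisect/insort) entirely: for each element it counts smaller and greater elements in the prefix by a direct linear scan, sums the minima and takes the modulus once at the end.
import Mathlib
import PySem

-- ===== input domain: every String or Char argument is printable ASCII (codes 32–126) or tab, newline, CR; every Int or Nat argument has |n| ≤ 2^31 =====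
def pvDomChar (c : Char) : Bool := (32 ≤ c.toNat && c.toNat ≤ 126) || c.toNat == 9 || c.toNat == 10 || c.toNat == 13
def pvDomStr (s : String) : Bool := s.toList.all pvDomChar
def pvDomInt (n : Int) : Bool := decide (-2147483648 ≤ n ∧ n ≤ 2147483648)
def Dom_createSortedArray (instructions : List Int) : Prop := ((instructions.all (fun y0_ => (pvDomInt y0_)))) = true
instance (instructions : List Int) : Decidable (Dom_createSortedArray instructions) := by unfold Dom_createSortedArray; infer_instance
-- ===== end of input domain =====

-- B replaces A's maintained sorted array with bisect/insort by a direct count of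
-- smaller/greater elements in each prefix (same O(n^2) cost, no bisect machinery).

-- ===== PORT A =====
-- one loop step of A: state = (current, res); i is the loop index
def pvStepA (instructions : List Int) (s : List Int × Int) (i : Int) : List Int × Int :=
  let x := PySem.List.pyGetD instructions i 0   -- instructions[i]; i ∈ range(len) is always in range
  let leftCost : Int := (PySem.List.bisectLeft s.1 x : Int)
  let rightCost : Int := i - (PySem.List.bisectRight s.1 x : Int)
  let res := PySem.Int.mod (s.2 + min leftCost rightCost) (10 ^ 9 + 7)
  -- bisect.insort current x = current.insert(bisect_right(current, x), x)
  (PySem.List.insert s.1 ((PySem.List.bisectRight s.1 x : Nat) : Int) x, res)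

def createSortedArray (instructions : List Int) : Int :=
  ((PySem.List.pyRange 0 (instructions.length : Int)).foldl (pvStepA instructions) ([], 0)).2

-- ===== PORT B =====
def createSortedArray_alt (instructions : List Int) : Int :=
  let total := (PySem.List.enumerate instructions).foldl
    (fun (acc : Int) (p : Int × Int) =>
      let c := (PySem.List.slice instructions none (some p.1)).foldl
        (fun (c : Int × Int) y =>
          if y < p.2 then (c.1 + 1, c.2) else if y > p.2 then (c.1, c.2 + 1) else c)
        (0, 0)
      acc + (if c.1 < c.2 then c.1 else c.2)) 0
  PySem.Int.mod total (10 ^ 9 + 7)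

-- ===== PRECONDITION & SPEC =====
def Spec_createSortedArray (instructions : List Int) (out : Int) : Prop := out = createSortedArray_alt instructions
instance (instructions : List Int) (out : Int) : Decidable (Spec_createSortedArray instructions out) := by unfold Spec_createSortedArray; infer_instance

-- ===== CLAIM (what is proved, stated in full; the proofs are below) =====
def Claim_equal_createSortedArray : Prop := ∀ (instructions : List Int), Dom_createSortedArray instructions → Spec_createSortedArray instructions (createSortedArray instructions)

-- ===== LEMMAS AND PROOFS =====

-- cost contributed by position i: min(#smaller, #greater) among the previous elements
def pvCost (xs : List Int) (i : Nat) : Int :=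
  let x := xs.getD i 0
  min ((xs.take i).countP (fun y => decide (y < x)) : Int)
      ((xs.take i).countP (fun y => decide (x < y)) : Int)

-- a predicate true exactly below index c has countP = c
lemma pv_countP_boundary (p : Int → Bool) :
    ∀ (l : List Int) (c : Nat), c ≤ l.length →
      (∀ j (hj : j < l.length), j < c → p l[j]) →
      (∀ j (hj : j < l.length), c ≤ j → ¬ p l[j]) →
      l.countP p = c := by
  intro l
  induction l with
  | nil =>
    intro c hc _ _
    simp only [List.length_nil, Nat.le_zero] at hc
    simp [hc]
  | cons a t ih =>
    intro c hc hlo hhi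
    cases c with
    | zero =>
      rw [List.countP_eq_zero]
      intro y hy
      obtain ⟨j, hj, rfl⟩ := List.getElem_of_mem hy
      exact hhi j hj (Nat.zero_le j)
    | succ c =>
      have hpa : p a := hlo 0 (by simp) (Nat.succ_pos c)
      rw [List.countP_cons_of_pos (pa := hpa)]
      have := ih c (by simpa using hc)
        (fun j hj hjc => hlo (j+1) (by simpa using hj) (by omega))
        (fun j hj hjc => hhi (j+1) (by simpa using hj) (by omega))
      omega

lemma pv_bisectLeft_count (l : List Int) (x : Int) (hs : List.Pairwise (· ≤ ·) l) :
    PySem.List.bisectLeft l x = l.countP (fun y => decide (y < x)) := by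
  obtain ⟨h1, h2, h3⟩ := PySem.List.bisectLeft_spec l x hs
  exact (pv_countP_boundary _ l _ h1
    (fun j hj hjc => by simpa using h2 j hj hjc)
    (fun j hj hjc => by simpa using h3 j hj hjc)).symm

lemma pv_bisectRight_count (l : List Int) (x : Int) (hs : List.Pairwise (· ≤ ·) l) :
    PySem.List.bisectRight l x = l.countP (fun y => decide (y ≤ x)) := by
  obtain ⟨h1, h2, h3⟩ := PySem.List.bisectRight_spec l x hs
  exact (pv_countP_boundary _ l _ h1
    (fun j hj hjc => by simpa using h2 j hj hjc)
    (fun j hj hjc => by simpa using h3 j hj hjc)).symm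

lemma pv_count_partition (l : List Int) (x : Int) :
    l.countP (fun y => decide (y ≤ x)) + l.countP (fun y => decide (x < y)) = l.length := by
  have := List.length_eq_countP_add_countP (p := fun y => decide (y ≤ x)) (l := l)
  rw [this]
  congr 1
  apply List.countP_congr
  intro y _
  simp [not_le]

-- insort keeps the list sorted and inserts one copy of x
lemma pv_insort (l : List Int) (x : Int) (hs : List.Pairwise (· ≤ ·) l) :
    List.Pairwise (· ≤ ·)
        (PySem.List.insert l ((PySem.List.bisectRight l x : Nat) : Int) x) ∧
      (PySem.List.insert l ((PySem.List.bisectRight l x : Nat) : Int) x).Perm (x :: l) := by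
  obtain ⟨h1, h2, h3⟩ := PySem.List.bisectRight_spec l x hs
  rw [PySem.List.insert_natCast l _ x h1]
  constructor
  · have hsplit := hs
    conv at hsplit => rw [← List.take_append_drop (PySem.List.bisectRight l x) l]
    rw [List.pairwise_append] at hsplit
    obtain ⟨hst, hsd, hcross⟩ := hsplit
    rw [List.pairwise_append]
    refine ⟨hst, ?_, ?_⟩
    · rw [List.pairwise_cons]
      refine ⟨?_, hsd⟩
      intro b hb
      obtain ⟨k, hk, rfl⟩ := List.getElem_of_mem hb
      rw [List.getElem_drop]
      exact le_of_lt (h3 _ (by simp at hk ⊢; omega) (by omega))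
    · intro a ha b hb
      rw [List.mem_cons] at hb
      rcases hb with rfl | hb
      · obtain ⟨i, hi, rfl⟩ := List.getElem_of_mem ha
        rw [List.getElem_take]
        exact h2 _ (by simp at hi ⊢; omega) (by simp at hi; omega)
      · exact hcross a ha b hb
  · have := List.perm_middle (a := x) (l₁ := List.take (PySem.List.bisectRight l x) l)
      (l₂ := List.drop (PySem.List.bisectRight l x) l)
    simpa [List.take_append_drop] using this

-- the invariant of A's loop after the first k iterations
lemma pv_A_loop (xs : List Int) :
    ∀ k : Nat, k ≤ xs.length →
      ((PySem.List.pyRange 0 (k : Int)).foldl (pvStepA xs) ([], 0)).1.Perm (xs.take k) ∧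
      List.Pairwise (· ≤ ·) ((PySem.List.pyRange 0 (k : Int)).foldl (pvStepA xs) ([], 0)).1 ∧
      ((PySem.List.pyRange 0 (k : Int)).foldl (pvStepA xs) ([], 0)).2
        = ((List.range k).map (pvCost xs)).sum % (10 ^ 9 + 7) := by
  intro k
  induction k with
  | zero =>
    intro _
    have h0 : PySem.List.pyRange 0 ((0 : Nat) : Int) = [] := by
      rw [PySem.List.pyRange_zero_natCast]; simp
    rw [h0]
    exact ⟨by simp, by simp, by simp⟩
  | succ k ih =>
    intro hk1
    obtain ⟨hperm, hsort, hres⟩ := ih (by omega)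
    have hklen : k < xs.length := by omega
    have hrange : PySem.List.pyRange 0 ((k + 1 : Nat) : Int)
        = PySem.List.pyRange 0 (k : Int) ++ [(k : Int)] := by
      push_cast
      exact PySem.List.pyRange_one_succ_right (by positivity)
    rw [hrange, List.foldl_append]
    set s := (PySem.List.pyRange 0 (k : Int)).foldl (pvStepA xs) ([], 0) with hsdef
    have hx : PySem.List.pyGetD xs (k : Int) 0 = xs.getD k 0 := by
      rw [PySem.List.pyGetD_eq_getElem xs 0 (by positivity) (by exact_mod_cast hklen),
        List.getD_eq_getElem xs 0 hklen]
      simp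
    set x := xs.getD k 0 with hxdef
    have hbl : PySem.List.bisectLeft s.1 x = (xs.take k).countP (fun y => decide (y < x)) := by
      rw [pv_bisectLeft_count s.1 x hsort, hperm.countP_eq]
    have hbr : PySem.List.bisectRight s.1 x = (xs.take k).countP (fun y => decide (y ≤ x)) := by
      rw [pv_bisectRight_count s.1 x hsort, hperm.countP_eq]
    have hlen : (xs.take k).length = k := by simp; omega
    have hpart := pv_count_partition (xs.take k) x
    have hrc : (k : Int) - (PySem.List.bisectRight s.1 x : Int)
        = ((xs.take k).countP (fun y => decide (x < y)) : Int) := by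
      rw [hbr]; rw [hlen] at hpart; omega
    have hmin : min ((PySem.List.bisectLeft s.1 x : Nat) : Int)
        ((k : Int) - (PySem.List.bisectRight s.1 x : Int)) = pvCost xs k := by
      rw [hrc, hbl, pvCost, ← hxdef]
    obtain ⟨hins_sort, hins_perm⟩ := pv_insort s.1 x hsort
    have htake : xs.take (k + 1) = xs.take k ++ [x] := by
      rw [hxdef, List.getD_eq_getElem xs 0 hklen]
      have h := List.take_concat_get (l := xs) (i := k) (h := hklen)
      rw [List.concat_eq_append] at h
      exact h.symm
    have hstep : pvStepA xs s (k : Int)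
        = (PySem.List.insert s.1 ((PySem.List.bisectRight s.1 x : Nat) : Int) x,
           PySem.Int.mod (s.2 + min ((PySem.List.bisectLeft s.1 x : Nat) : Int)
             ((k : Int) - ((PySem.List.bisectRight s.1 x : Nat) : Int))) (10 ^ 9 + 7)) := by
      simp only [pvStepA, hx]
    rw [List.foldl_cons, List.foldl_nil, hstep]
    refine ⟨?_, ?_, ?_⟩
    · refine hins_perm.trans ((hperm.cons x).trans ?_)
      rw [htake]
      simpa using (List.perm_middle (a := x) (l₁ := xs.take k) (l₂ := ([] : List Int))).symm
    · exact hins_sort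
    · show PySem.Int.mod (s.2 + _) _ = _
      rw [hmin, hres, PySem.Int.mod_eq_emod_of_pos (by norm_num), Int.emod_add_emod,
        List.range_succ, List.map_append, List.sum_append]
      simp

lemma pv_enumerate_eq (xs : List Int) :
    ∀ s : Int, PySem.List.enumerate xs s
      = (List.range xs.length).map (fun (i : Nat) => (s + (i : Int), xs.getD i 0)) := by
  induction xs with
  | nil => intro s; simp [PySem.List.enumerate]
  | cons a t ih =>
    intro s
    rw [show PySem.List.enumerate (a :: t) s = (s, a) :: PySem.List.enumerate t (s + 1) from rfl,
      ih (s + 1)]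
    simp only [List.length_cons, List.range_succ_eq_map, List.map_cons, List.map_map]
    refine congrArg₂ List.cons (by simp) ?_
    apply List.map_congr_left
    intro i _
    simp only [Function.comp_apply, List.getD_cons_succ, Prod.mk.injEq]
    refine ⟨by push_cast; ring, trivial⟩

lemma pv_B_eq (xs : List Int) :
    createSortedArray_alt xs = ((List.range xs.length).map (pvCost xs)).sum % (10 ^ 9 + 7) := by
  rw [createSortedArray_alt, pv_enumerate_eq, List.foldl_map]
  rw [PySem.List.foldl_congr_mem _ _
    (fun (acc : Int) (i : Nat) => acc + pvCost xs i) 0 ?_]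
  · rw [PySem.List.foldl_add]
    simp
  · intro acc i hi
    simp only []
    rw [PySem.List.slice_to _ (by positivity)]
    have htn : ((0 : Int) + (i : Int)).toNat = i := by omega
    rw [htn]
    set x := xs.getD i 0 with hx
    rw [PySem.List.foldl_congr_mem _ _
      (fun (c : Int × Int) (y : Int) =>
        ((fun (a : Int) (y : Int) => if y < x then a + 1 else a) c.1 y,
         (fun (b : Int) (y : Int) => if y > x then b + 1 else b) c.2 y)) (0, 0)
      (by
        intro c y _
        dsimp only
        split_ifs with h1 h2 <;> simp_all
        omega)]
    rw [PySem.List.foldl_prod_mk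
      (f := fun (a : Int) (y : Int) => if y < x then a + 1 else a)
      (g := fun (b : Int) (y : Int) => if y > x then b + 1 else b)]
    rw [PySem.List.foldl_ite_add_one (p := fun y => y < x),
        PySem.List.foldl_ite_add_one (p := fun y => y > x)]
    simp only [pvCost, ← hx, zero_add]
    have hmin : ∀ a b : Int, (if a < b then a else b) = min a b := by
      intro a b; split_ifs <;> omega
    rw [hmin]

-- ===== VERDICT (by name: the statement is the Claim_ definition above) =====
theorem createSortedArray_spec : Claim_equal_createSortedArray := by
  intro xs _
  unfold Spec_createSortedArray
  have hA := (pv_A_loop xs xs.length le_rfl).2.2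
  rw [createSortedArray, hA, pv_B_eq]
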